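-- pv_equiv track=rewrite | github.com/ChinaPxx/px | main/bfc_ibs.py | bf_for_special_edge
-- ===== SOURCE A (Python) =====
-- def bf_for_special_edge(neighbor_list, edge_vertex1, edge_vertex2):
--     bc_num_edge = 0
--     # 第一步，得到节点1的邻居节点集合，不包含2
--     if edge_vertex1 not in neighbor_list.keys():
--         return -1
--     vertex1_neighbor_list = neighbor_list[edge_vertex1]
--     if edge_vertex2 in vertex1_neighbor_list:
--         vertex1_neighbor_list.remove(edge_vertex2)
--
--     # 第二步，得到节点2的邻居节点集合，不包含1
--     if edge_vertex2 not in neighbor_list.keys():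
--         return -1
--     vertex2_neighbor_list = neighbor_list[edge_vertex2]
--     if edge_vertex1 in vertex2_neighbor_list:
--         vertex2_neighbor_list.remove(edge_vertex1)
--
--     # 循环求交集
--     for item in vertex1_neighbor_list:
--         item_neighbor_list = neighbor_list[item]
--         for item_1 in item_neighbor_list:
--             if item_1 in vertex2_neighbor_list:
--                 bc_num_edge += 1
--     return bc_num_edge
-- ===== SOURCE B (Python) =====
-- def _drop_first(lst, v):
--     # remove the first occurrence of v from lst in place (if present); return lst
--     if v in lst:
--         lst.remove(v)
--     return lst
--
--
-- def bf_for_special_edge(neighbor_list, edge_vertex1, edge_vertex2):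
--     # Tally-then-sum decomposition instead of the nested membership scan.
--     # Return-value equivalent to the original; performs the same in-place
--     # .remove mutations, except that when edge_vertex1 is a key but
--     # edge_vertex2 is not (result -1 either way) it skips the first .remove.
--     if edge_vertex1 in neighbor_list and edge_vertex2 in neighbor_list:
--         v1 = _drop_first(neighbor_list[edge_vertex1], edge_vertex2)
--         v2 = _drop_first(neighbor_list[edge_vertex2], edge_vertex1)
--         tally = {}
--         for item in v1:
--             for x in neighbor_list[item]:
--                 tally[x] = tally.get(x, 0) + 1
--         return sum(tally.get(x, 0) for x in set(v2))
--     return -1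
-- ===== Notes on version B (the rewrite author's own statement) =====
-- stated objective: alternative
-- what changed: Replaces the nested loop with a per-element membership test in vertex2's list by a two-pass tally-then-sum: one pass builds a frequency table of all second-level neighbours, a second pass sums the table over vertex2's distinct neighbours; the guards collapse into a single combined key check and the first-occurrence removals move into a helper.
import Mathlib
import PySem

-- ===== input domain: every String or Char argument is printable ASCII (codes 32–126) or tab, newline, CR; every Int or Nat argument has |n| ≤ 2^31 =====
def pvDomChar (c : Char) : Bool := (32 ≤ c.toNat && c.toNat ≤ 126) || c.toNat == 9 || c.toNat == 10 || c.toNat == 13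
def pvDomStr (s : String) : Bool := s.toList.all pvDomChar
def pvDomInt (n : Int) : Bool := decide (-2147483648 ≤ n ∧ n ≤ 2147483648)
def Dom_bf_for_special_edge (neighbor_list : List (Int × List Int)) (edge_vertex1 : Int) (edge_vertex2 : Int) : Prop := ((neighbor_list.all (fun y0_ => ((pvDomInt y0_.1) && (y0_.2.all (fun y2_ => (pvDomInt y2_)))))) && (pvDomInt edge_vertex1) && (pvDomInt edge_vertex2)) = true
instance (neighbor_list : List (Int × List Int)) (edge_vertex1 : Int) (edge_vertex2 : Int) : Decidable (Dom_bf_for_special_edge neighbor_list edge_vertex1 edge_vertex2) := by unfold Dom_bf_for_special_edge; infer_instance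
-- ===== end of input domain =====

-- B replaces A's nested membership scan by a tally-then-sum decomposition (frequency
-- table over second-level neighbours, then a sum over v2's distinct neighbours), with
-- a single combined key guard instead of A's two staged guards. Equivalence is about
-- the RETURN value; B skips A's first in-place .remove in the one case where
-- edge_vertex1 is a key but edge_vertex2 is not (both return -1 there).

-- ===== PORT A =====
-- the two `insert`s model Python's in-place `.remove` mutating the list stored in the
-- dict; `v1final` re-reads the dict so the aliasing when edge_vertex1 = edge_vertex2 is exact
def bf_for_special_edge (neighbor_list : List (Int × List Int)) (edge_vertex1 : Int) (edge_vertex2 : Int) : Int :=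
  let d0 := PySem.Dict.mk neighbor_list
  match d0.get? edge_vertex1 with
  | none => -1
  | some l1 =>
    let l1' := if l1.contains edge_vertex2 then (PySem.List.remove? l1 edge_vertex2).getD l1 else l1
    let d1 := d0.insert edge_vertex1 l1'
    match d1.get? edge_vertex2 with
    | none => -1
    | some l2 =>
      let l2' := if l2.contains edge_vertex1 then (PySem.List.remove? l2 edge_vertex1).getD l2 else l2
      let d2 := d1.insert edge_vertex2 l2'
      let v1final := d2.getD edge_vertex1 []
      v1final.foldl (fun acc item =>
        (d2.getD item []).foldl (fun acc x => if l2'.contains x then acc + 1 else acc) acc) 0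

-- ===== PORT B =====
-- B's helper _drop_first: copy-free first-occurrence removal (the Python mutates in place;
-- in the port the mutated values are threaded through the `look` view of the dict below)
def pvDropFirst (l : List Int) (v : Int) : List Int :=
  if l.contains v then (PySem.List.remove? l v).getD l else l

def bf_for_special_edge_alt (neighbor_list : List (Int × List Int)) (edge_vertex1 : Int) (edge_vertex2 : Int) : Int :=
  let d := PySem.Dict.mk neighbor_list
  if d.contains edge_vertex1 && d.contains edge_vertex2 then
    let l1' := pvDropFirst (d.getD edge_vertex1 []) edge_vertex2
    -- neighbor_list[edge_vertex2] is read AFTER the first in-place removal, so when the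
    -- two endpoints coincide it is the already-pruned list l1'
    let v2 := pvDropFirst (if edge_vertex2 == edge_vertex1 then l1' else d.getD edge_vertex2 []) edge_vertex1
    let v1 := if edge_vertex1 == edge_vertex2 then v2 else l1'
    -- `look` is what `neighbor_list[item]` yields after the two in-place mutations
    let look := fun item => if item == edge_vertex2 then v2
                            else if item == edge_vertex1 then l1'
                            else d.getD item []
    let tally := v1.foldl (fun c item =>
      (look item).foldl (fun c x => c.insert x (c.getD x 0 + 1)) c)
      (PySem.Dict.empty : PySem.Dict Int Int)
    (PySem.Set.ofList v2).foldl (fun acc x => acc + tally.getD x 0) 0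
  else -1

-- ===== PRECONDITION & SPEC =====
-- Pre_ excludes exactly the inputs where Python A raises KeyError: when both endpoints
-- are keys, every first-level neighbour of edge_vertex1 must itself be a key of the dict.
def Pre_bf_for_special_edge (neighbor_list : List (Int × List Int)) (edge_vertex1 : Int) (edge_vertex2 : Int) : Prop :=
  (let d := PySem.Dict.mk neighbor_list
   !(d.contains edge_vertex1 && d.contains edge_vertex2) ||
     (d.getD edge_vertex1 []).all (fun x => x == edge_vertex2 || d.contains x)) = true
instance (neighbor_list : List (Int × List Int)) (edge_vertex1 : Int) (edge_vertex2 : Int) : Decidable (Pre_bf_for_special_edge neighbor_list edge_vertex1 edge_vertex2) := by unfold Pre_bf_for_special_edge; infer_instance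
def pvWitness_bf_for_special_edge : (List (Int × List Int)) × Int × Int :=
  ([(1, [2, 3]), (2, [1, 3]), (3, [1, 2])], 1, 2)

def Spec_bf_for_special_edge (neighbor_list : List (Int × List Int)) (edge_vertex1 : Int) (edge_vertex2 : Int) (out : Int) : Prop := out = bf_for_special_edge_alt neighbor_list edge_vertex1 edge_vertex2
instance (neighbor_list : List (Int × List Int)) (edge_vertex1 : Int) (edge_vertex2 : Int) (out : Int) : Decidable (Spec_bf_for_special_edge neighbor_list edge_vertex1 edge_vertex2 out) := by unfold Spec_bf_for_special_edge; infer_instance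

-- ===== CLAIM (what is proved, stated in full; the proofs are below) =====
def Claim_equal_bf_for_special_edge : Prop := ∀ (neighbor_list : List (Int × List Int)) (edge_vertex1 : Int) (edge_vertex2 : Int), Dom_bf_for_special_edge neighbor_list edge_vertex1 edge_vertex2 → Pre_bf_for_special_edge neighbor_list edge_vertex1 edge_vertex2 → Spec_bf_for_special_edge neighbor_list edge_vertex1 edge_vertex2 (bf_for_special_edge neighbor_list edge_vertex1 edge_vertex2)

-- ===== LEMMAS AND PROOFS =====

-- A's nested loop is a countP over the flattened second-level neighbour multiset
lemma aLoop_eq_countP (f : Int → List Int) (v1 l2 : List Int) (a : Int) :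
    v1.foldl (fun acc item =>
      (f item).foldl (fun acc x => if l2.contains x then acc + 1 else acc) acc) a
    = a + ((v1.flatMap f).countP (fun x => l2.contains x) : Int) := by
  induction v1 generalizing a with
  | nil => simp
  | cons hd tl ih =>
    simp only [List.foldl_cons, List.flatMap_cons, List.countP_append]
    rw [PySem.List.foldl_if_add_one, ih]
    push_cast
    ring

-- B's frequency table reads back as a count over the same flattened multiset
lemma counts_getD_eq_count (f : Int → List Int) (v1 : List Int)
    (c : PySem.Dict Int Int) (x : Int) :
    (v1.foldl (fun c item =>
      (f item).foldl (fun c x => c.insert x (c.getD x 0 + 1)) c) c).getD x 0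
    = c.getD x 0 + ((v1.flatMap f).count x : Int) := by
  induction v1 generalizing c with
  | nil => simp
  | cons hd tl ih =>
    simp only [List.foldl_cons, List.flatMap_cons, List.count_append]
    rw [ih, PySem.Dict.getD_foldl_insert_add_one]
    push_cast
    ring

lemma countP_cons_mem (a : Int) (s L : List Int) (ha : a ∉ s) :
    L.countP (fun x => decide (x ∈ a :: s))
    = L.count a + L.countP (fun x => decide (x ∈ s)) := by
  induction L with
  | nil => simp
  | cons y L ih =>
    simp only [List.countP_cons, List.count_cons, ih]
    by_cases hy : y = a
    · subst hy
      have hns : ¬ (y ∈ s) := ha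
      simp [hns]
      omega
    · by_cases hys : y ∈ s <;> simp [hy, hys] <;> try omega

-- a membership countP is the sum of per-element counts over the distinct members
lemma countP_mem_eq_sum (s L : List Int) (hs : s.Nodup) :
    (L.countP (fun x => decide (x ∈ s)) : Int)
    = (s.map (fun x => (L.count x : Int))).sum := by
  induction s with
  | nil => simp
  | cons a s ih =>
    have ha : a ∉ s := (List.nodup_cons.mp hs).1
    have hs' : s.Nodup := (List.nodup_cons.mp hs).2
    rw [countP_cons_mem a s L ha]
    simp only [List.map_cons, List.sum_cons]
    rw [← ih hs']
    push_cast
    ring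

-- the core equality of the two loop decompositions, over an arbitrary lookup view f
lemma loop_eq (f : Int → List Int) (v1 l2 : List Int) :
    v1.foldl (fun acc item =>
      (f item).foldl (fun acc x => if l2.contains x then acc + 1 else acc) acc) (0 : Int)
    = (PySem.Set.ofList l2).foldl (fun acc x => acc +
        (v1.foldl (fun c item =>
          (f item).foldl (fun c x => c.insert x (c.getD x 0 + 1)) c)
          (PySem.Dict.empty : PySem.Dict Int Int)).getD x 0) 0 := by
  rw [aLoop_eq_countP, PySem.List.foldl_add]
  have hmap : (PySem.Set.ofList l2).map (fun x =>
        (v1.foldl (fun c item =>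
          (f item).foldl (fun c x => c.insert x (c.getD x 0 + 1)) c)
          (PySem.Dict.empty : PySem.Dict Int Int)).getD x 0)
      = (PySem.Set.ofList l2).map (fun x => ((v1.flatMap f).count x : Int)) :=
    List.map_congr_left (fun x _ => by rw [counts_getD_eq_count]; simp)
  rw [hmap, ← countP_mem_eq_sum _ _ (PySem.Set.nodup_ofList l2)]
  have hp : (fun x => l2.contains x) = (fun x => decide (x ∈ PySem.Set.ofList l2)) := by
    funext x
    simp [PySem.Set.mem_ofList]
  rw [hp]

-- pointwise-equal lookup views and equal start lists give equal results
lemma main_eq (f g : Int → List Int) (hfg : ∀ i, f i = g i) (v1 v1' l2 : List Int)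
    (hv : v1 = v1') :
    v1.foldl (fun acc item =>
      (f item).foldl (fun acc x => if l2.contains x then acc + 1 else acc) acc) (0 : Int)
    = (PySem.Set.ofList l2).foldl (fun acc x => acc +
        (v1'.foldl (fun c item =>
          (g item).foldl (fun c x => c.insert x (c.getD x 0 + 1)) c)
          (PySem.Dict.empty : PySem.Dict Int Int)).getD x 0) 0 := by
  subst hv
  have hfg' : f = g := funext hfg
  subst hfg'
  exact loop_eq f v1 l2

-- ===== VERDICT (by name: the statement is the Claim_ definition above) =====
theorem bf_for_special_edge_spec : Claim_equal_bf_for_special_edge := by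
  intro nl e1 e2 _ _
  show bf_for_special_edge nl e1 e2 = bf_for_special_edge_alt nl e1 e2
  unfold bf_for_special_edge bf_for_special_edge_alt pvDropFirst
  cases h1 : (PySem.Dict.mk nl).get? e1 with
  | none =>
    have hc1 : (PySem.Dict.mk nl).contains e1 = false := by
      rw [PySem.Dict.contains_eq_isSome_get?, h1]; rfl
    simp [h1, hc1]
  | some l1 =>
    have hc1 : (PySem.Dict.mk nl).contains e1 = true := by
      rw [PySem.Dict.contains_eq_isSome_get?, h1]; rfl
    have hg1 : (PySem.Dict.mk nl).getD e1 [] = l1 := by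
      rw [PySem.Dict.getD_eq_get?_getD, h1]; rfl
    simp only [h1]
    cases h2 : ((PySem.Dict.mk nl).insert e1
        (if l1.contains e2 then (PySem.List.remove? l1 e2).getD l1 else l1)).get? e2 with
    | none =>
      have hne : e2 ≠ e1 := by
        intro h
        rw [h, PySem.Dict.get?_insert_self] at h2
        simp at h2
      have hc2 : (PySem.Dict.mk nl).contains e2 = false := by
        rw [PySem.Dict.contains_eq_isSome_get?,
          ← PySem.Dict.get?_insert_of_ne _ (if l1.contains e2 then (PySem.List.remove? l1 e2).getD l1 else l1) hne, h2]
        rfl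
      simp [hc2]
    | some l2 =>
      have hc2 : (PySem.Dict.mk nl).contains e2 = true := by
        by_cases hne : e2 = e1
        · rw [hne]; exact hc1
        · rw [PySem.Dict.contains_eq_isSome_get?,
            ← PySem.Dict.get?_insert_of_ne _ (if l1.contains e2 then (PySem.List.remove? l1 e2).getD l1 else l1) hne, h2]
          rfl
      have hl2B : (if e2 == e1 then
            (if (PySem.Dict.getD (PySem.Dict.mk nl) e1 []).contains e2 then (PySem.List.remove? (PySem.Dict.getD (PySem.Dict.mk nl) e1 []) e2).getD (PySem.Dict.getD (PySem.Dict.mk nl) e1 []) else PySem.Dict.getD (PySem.Dict.mk nl) e1 [])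
          else PySem.Dict.getD (PySem.Dict.mk nl) e2 []) = l2 := by
        by_cases hne : e2 = e1
        · subst hne
          rw [PySem.Dict.get?_insert_self] at h2
          injection h2 with h
          simp only [beq_self_eq_true, if_pos, hg1]
          exact h
        · have hbe : (e2 == e1) = false := by simp [hne]
          rw [hbe]
          simp only [Bool.false_eq_true, if_false]
          have h2' : (PySem.Dict.mk nl).get? e2 = some l2 := by
            rw [← PySem.Dict.get?_insert_of_ne _ (if l1.contains e2 then (PySem.List.remove? l1 e2).getD l1 else l1) hne (k := e1)]
            exact h2
          rw [PySem.Dict.getD_eq_get?_getD, h2']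
          rfl
      rw [hl2B, hc1, hc2]
      simp only [Bool.and_self, if_true]
      refine main_eq _ _ ?_ _ _ _ ?_
      · intro j
        rw [PySem.Dict.getD_insert, PySem.Dict.getD_insert]
        by_cases hj2 : j = e2
        · simp [hj2]
        · by_cases hj1 : j = e1
          · simp [hj1, hg1]
          · simp [hj1, hj2]
      · rw [PySem.Dict.getD_insert]
        by_cases h12 : e1 = e2
        · simp [h12]
        · simp [h12, hg1]
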